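-- pv_equiv track=rewrite | github.com/anton-poleo/cryptopy | lab0_task2.py | base64_to_hex
-- ===== SOURCE A (Python) =====
-- arr_base64_2=['A000000', 'B000001', 'C000010', 'D000011', 'E000100', 'F000101', 'G000110', 'H000111', 'I001000', 'J001001', 'K001010', 'L001011', 'M001100', 'N001101', 'O001110', 'P001111', 'Q010000', 'R010001', 'S010010', 'T010011', 'U010100', 'V010101', 'W010110', 'X010111', 'Y011000', 'Z011001', 'a011010', 'b011011', 'c011100', 'd011101', 'e011110', 'f011111', 'g100000', 'h100001', 'i100010', 'j100011', 'k100100', 'l100101', 'm100110', 'n100111', 'o101000', 'p101001', 'q101010', 'r101011', 's101100', 't101101', 'u101110', 'v101111', 'w110000', 'x110001', 'y110010', 'z110011', '0110100', '1110101', '2110110', '3110111', '4111000', '5111001', '6111010', '7111011', '8111100', '9111101', '+111110', '/111111']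
--
-- def base64_to_bin(str_base):
--     if(len(str_base) != 4):
--         return None
--     bin_str = ''
--     #создаем словарь {символ : ее двоичное значение в base64}
--     dict_base64 = {}
--     for x in arr_base64_2:
--         dict_base64[x[:1]] = x[1:]
--     for i in range(4):
--         if(str_base[i] != '='):
--             bin_str += dict_base64[str_base[i]]
--         else:
--             bin_str += '000000'
--     return bin_str
--
-- def bin_to_hex(str_bin, amount_zero):
--     if (len(str_bin) != 24):
--         return None
--     str = ''
--     amount_unit = int(3 - amount_zero)
--     for i in range(amount_unit):
--         hex_str_byte = hex(int(str_bin[8 * i:8 * i + 8:], 2))[2:]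
--         hex_str_byte = '{0:0>2}'.format(hex_str_byte)
--         str += hex_str_byte
--     return str
--
-- def base64_to_hex(str_base):
--     if(len(str_base)%4 != 0) and (len(str_base) != 0):
--         return None
--     #количество 4хзначных блоков в str_base
--     amount_unit = int(len(str_base)/4)
--     res = ''
--     for x in range(amount_unit - 1):
--         bin_str = base64_to_bin(str_base[x * 4:x * 4 + 4:])
--         res += bin_to_hex(bin_str, 0)
--     if (str_base[(amount_unit-1)*4 + 3]) != '=':
--         bin_str = base64_to_bin(str_base[(amount_unit - 1) * 4:(amount_unit - 1) * 4 + 4:])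
--         res += bin_to_hex(bin_str, 0)
--     elif ((str_base[(amount_unit-1)*4 + 3]) == '=') and ((str_base[(amount_unit-1)*4 + 2]) != '='):
--         bin_str = base64_to_bin(str_base[(amount_unit - 1) * 4:(amount_unit - 1) * 4 + 4:])
--         res += bin_to_hex(bin_str, 1)
--     else:
--         bin_str = base64_to_bin(str_base[(amount_unit - 1) * 4:(amount_unit - 1) * 4 + 4:])
--         res += bin_to_hex(bin_str, 2)
--     return res
-- ===== SOURCE B (Python) =====
-- _B64 = 'ABCDEFGHIJKLMNOPQRSTUVWXYZabcdefghijklmnopqrstuvwxyz0123456789+/'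
-- _VAL = {c: i for i, c in enumerate(_B64)}
-- _VAL['='] = 0
--
--
-- def base64_to_hex(str_base):
--     n = len(str_base)
--     if n % 4 != 0:
--         return None
--     out = []
--     for i in range(0, n, 4):
--         v = 0
--         for c in str_base[i:i + 4]:
--             v = v * 64 + _VAL[c]
--         nbytes = 3
--         if i + 4 == n and str_base[i + 3] == '=':
--             nbytes = 1 if str_base[i + 2] == '=' else 2
--         for k in range(nbytes):
--             out.append('%02x' % (v // 256 ** (2 - k) % 256))
--     return ''.join(out)
-- ===== Notes on version B (the rewrite author's own statement) =====
-- stated objective: alternative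
-- what changed: B decodes each 4-char block to one 24-bit integer via a char-to-value dict and extracts hex bytes by arithmetic (div/mod), in one uniform loop over blocks, instead of A's per-char binary-string concatenation, string slicing and int(.,2)/hex() re-parsing spread over three helpers.
import Mathlib
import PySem

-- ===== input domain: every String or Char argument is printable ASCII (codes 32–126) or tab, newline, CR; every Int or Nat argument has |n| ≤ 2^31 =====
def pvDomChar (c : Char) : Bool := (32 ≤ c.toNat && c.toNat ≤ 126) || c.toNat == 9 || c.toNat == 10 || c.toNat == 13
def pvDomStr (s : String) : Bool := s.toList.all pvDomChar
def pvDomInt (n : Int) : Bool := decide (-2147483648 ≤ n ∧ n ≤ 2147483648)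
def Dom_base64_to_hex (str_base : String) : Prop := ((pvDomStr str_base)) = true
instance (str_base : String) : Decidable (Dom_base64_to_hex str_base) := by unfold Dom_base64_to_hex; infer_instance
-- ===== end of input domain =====

-- B decodes each 4-char block into one 24-bit integer via a char→value dict and extracts hex
-- bytes arithmetically in a single uniform loop, instead of A's binary-string concatenation,
-- slicing and re-parsing spread over three helpers (objective: alternative, same cost).

-- ===== PORT A =====
def pvArr : List String := ["A000000", "B000001", "C000010", "D000011", "E000100", "F000101", "G000110", "H000111", "I001000", "J001001", "K001010", "L001011", "M001100", "N001101", "O001110", "P001111", "Q010000", "R010001", "S010010", "T010011", "U010100", "V010101", "W010110", "X010111", "Y011000", "Z011001", "a011010", "b011011", "c011100", "d011101", "e011110", "f011111", "g100000", "h100001", "i100010", "j100011", "k100100", "l100101", "m100110", "n100111", "o101000", "p101001", "q101010", "r101011", "s101100", "t101101", "u101110", "v101111", "w110000", "x110001", "y110010", "z110011", "0110100", "1110101", "2110110", "3110111", "4111000", "5111001", "6111010", "7111011", "8111100", "9111101", "+111110", "/111111"]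

-- dict {x[:1]: x[1:]}; the 1-char string keys are modelled as Char
def pvDictA : PySem.Dict Char (List Char) :=
  pvArr.foldl (fun d x => d.insert (x.toList.headD '?') (x.toList.drop 1)) PySem.Dict.empty

def pvA_base64_to_bin (cs : List Char) : Option (List Char) :=
  if cs.length ≠ 4 then none
  else some ((List.range 4).foldl (fun acc i =>
    if cs.getD i ' ' ≠ '=' then
      acc ++ pvDictA.getD (cs.getD i ' ') []   -- Python raises KeyError for a char not in the dict; Pre_ excludes those inputs
    else acc ++ ['0', '0', '0', '0', '0', '0']) [])

def pvHexDigitA (n : Nat) : Char := if n < 10 then Char.ofNat (48 + n) else Char.ofNat (87 + n)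

-- '{0:0>2}'.format(hex(n)[2:]) — exact for 0 ≤ n < 256, the only values reached under Pre_
def pvHexA (n : Int) : List Char :=
  let h := if n < 16 then [pvHexDigitA n.toNat] else [pvHexDigitA (n.toNat / 16), pvHexDigitA (n.toNat % 16)]
  if h.length = 1 then '0' :: h else h

def pvA_bin_to_hex (bs : List Char) (amount_zero : Int) : Option (List Char) :=
  if bs.length ≠ 24 then none
  else some ((List.range (3 - amount_zero).toNat).foldl (fun acc i =>
    acc ++ pvHexA ((PySem.Int.ofCharsBase? (PySem.List.slice bs (some ((8 * i : Nat) : Int)) (some ((8 * i + 8 : Nat) : Int))) 2).getD 0)) [])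
    -- int(·, 2) raises ValueError on non-binary chars; Pre_ excludes the inputs reaching that (the .getD 0 is unreached)

def base64_to_hex (str_base : String) : Option String :=
  let cs := str_base.toList
  if cs.length % 4 ≠ 0 ∧ cs.length ≠ 0 then none
  else
    let amount_unit := cs.length / 4  -- int(len(str_base)/4); exact: here 4 ∣ len
    let res := (List.range (amount_unit - 1)).foldl (fun r x =>
      r ++ ((pvA_base64_to_bin (PySem.List.slice cs (some ((4 * x : Nat) : Int)) (some ((4 * x + 4 : Nat) : Int)))).bind
            (fun b => pvA_bin_to_hex b 0)).getD []) []
      -- a None from the helpers would be a TypeError on '+=' in Python; Pre_ excludes the inputs reaching it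
    let last := PySem.List.slice cs (some (((amount_unit : Int) - 1) * 4)) (some (((amount_unit : Int) - 1) * 4 + 4))
    if PySem.List.pyGet? cs (((amount_unit : Int) - 1) * 4 + 3) ≠ some '=' then
      -- pyGet? = none is Python's IndexError (only reached on the empty string); Pre_ excludes it
      some (String.ofList (res ++ ((pvA_base64_to_bin last).bind (fun b => pvA_bin_to_hex b 0)).getD []))
    else if PySem.List.pyGet? cs (((amount_unit : Int) - 1) * 4 + 3) = some '=' ∧
            PySem.List.pyGet? cs (((amount_unit : Int) - 1) * 4 + 2) ≠ some '=' then
      some (String.ofList (res ++ ((pvA_base64_to_bin last).bind (fun b => pvA_bin_to_hex b 1)).getD []))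
    else
      some (String.ofList (res ++ ((pvA_base64_to_bin last).bind (fun b => pvA_bin_to_hex b 2)).getD []))

-- ===== PORT B =====
def pvB64Chars : List Char := "ABCDEFGHIJKLMNOPQRSTUVWXYZabcdefghijklmnopqrstuvwxyz0123456789+/".toList

def pvValB : PySem.Dict Char Int :=
  ((PySem.List.enumerate pvB64Chars).foldl (fun d p => d.insert p.2 p.1) PySem.Dict.empty).insert '=' 0

def pvHexDigitB (n : Nat) : Char := "0123456789abcdef".toList.getD n '0' 

-- '%02x' % n — exact for 0 ≤ n < 256, the only values reached under Pre_
def pvHexB (n : Int) : List Char := [pvHexDigitB (n.toNat / 16), pvHexDigitB (n.toNat % 16)]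

def base64_to_hex_alt (str_base : String) : Option String :=
  let cs := str_base.toList
  let n : Int := cs.length
  if PySem.Int.mod n 4 ≠ 0 then none
  else some (String.ofList ((PySem.List.pyRange 0 n 4).foldl (fun out i =>
    let v := (PySem.List.slice cs (some i) (some (i + 4))).foldl
               (fun v c => v * 64 + pvValB.getD c 0) 0
               -- KeyError for a char outside the dict; Pre_ excludes those inputs
    let nbytes : Nat :=
      if i + 4 = n ∧ PySem.List.pyGet? cs (i + 3) = some '=' then
        (if PySem.List.pyGet? cs (i + 2) = some '=' then 1 else 2)
      else 3
    (List.range nbytes).foldl (fun out k =>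
      out ++ pvHexB (PySem.Int.mod (PySem.Int.floordiv v ((256 : Int) ^ (2 - k))) 256)) out) []))

-- ===== PRECONDITION & SPEC =====
def pvValidChars : List Char := ['A', 'B', 'C', 'D', 'E', 'F', 'G', 'H', 'I', 'J', 'K', 'L', 'M', 'N', 'O', 'P', 'Q', 'R', 'S', 'T', 'U', 'V', 'W', 'X', 'Y', 'Z', 'a', 'b', 'c', 'd', 'e', 'f', 'g', 'h', 'i', 'j', 'k', 'l', 'm', 'n', 'o', 'p', 'q', 'r', 's', 't', 'u', 'v', 'w', 'x', 'y', 'z', '0', '1', '2', '3', '4', '5', '6', '7', '8', '9', '+', '/', '=']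

-- Pre_ excludes the empty string (A raises IndexError indexing position -1) and, when the
-- length is a multiple of 4, strings containing a char outside the base64 alphabet and padding
-- (A raises KeyError in its dict lookup); everywhere else A returns normally.
def Pre_base64_to_hex (str_base : String) : Prop :=
  str_base.toList ≠ [] ∧
    (str_base.toList.length % 4 = 0 → (str_base.toList.all (fun c => pvValidChars.contains c)) = true)
instance (str_base : String) : Decidable (Pre_base64_to_hex str_base) := by
  unfold Pre_base64_to_hex; infer_instance

def pvWitness_base64_to_hex : String := "TWE="

def Spec_base64_to_hex (str_base : String) (out : Option String) : Prop := out = base64_to_hex_alt str_base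
instance (str_base : String) (out : Option String) : Decidable (Spec_base64_to_hex str_base out) := by
  unfold Spec_base64_to_hex; infer_instance

-- ===== CLAIM (what is proved, stated in full; the proofs are below) =====
def Claim_equal_base64_to_hex : Prop := ∀ (str_base : String), Dom_base64_to_hex str_base → Pre_base64_to_hex str_base → Spec_base64_to_hex str_base (base64_to_hex str_base)

-- ===== LEMMAS AND PROOFS =====

-- value of a binary-digit string, A's int(·, 2) on the strings it actually sees
def pvBitsVal (l : List Char) : Int := l.foldl (fun a c => 2 * a + (if c = '1' then 1 else 0)) 0

def pvCh (b : Bool) : Char := if b then '1' else '0'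

-- the 6-bit chunk A's base64_to_bin appends for one char
def pvBitsOf (c : Char) : List Char :=
  if c ≠ '=' then pvDictA.getD c [] else ['0', '0', '0', '0', '0', '0']

-- B's 24-bit block value
def pvBlockVal (c0 c1 c2 c3 : Char) : Int :=
  ((pvValB.getD c0 0 * 64 + pvValB.getD c1 0) * 64 + pvValB.getD c2 0) * 64 + pvValB.getD c3 0

-- literal forms of the two dicts, computed once so later `decide`s stay shallow
def pvDictL : PySem.Dict Char (List Char) := PySem.Dict.mk [('A', ['0', '0', '0', '0', '0', '0']), ('B', ['0', '0', '0', '0', '0', '1']), ('C', ['0', '0', '0', '0', '1', '0']), ('D', ['0', '0', '0', '0', '1', '1']), ('E', ['0', '0', '0', '1', '0', '0']), ('F', ['0', '0', '0', '1', '0', '1']), ('G', ['0', '0', '0', '1', '1', '0']), ('H', ['0', '0', '0', '1', '1', '1']), ('I', ['0', '0', '1', '0', '0', '0']), ('J', ['0', '0', '1', '0', '0', '1']), ('K', ['0', '0', '1', '0', '1', '0']), ('L', ['0', '0', '1', '0', '1', '1']), ('M', ['0', '0', '1', '1', '0', '0']), ('N', ['0', '0', '1', '1', '0', '1']), ('O',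 ['0', '0', '1', '1', '1', '0']), ('P', ['0', '0', '1', '1', '1', '1']), ('Q', ['0', '1', '0', '0', '0', '0']), ('R', ['0', '1', '0', '0', '0', '1']), ('S', ['0', '1', '0', '0', '1', '0']), ('T', ['0', '1', '0', '0', '1', '1']), ('U', ['0', '1', '0', '1', '0', '0']), ('V', ['0', '1', '0', '1', '0', '1']), ('W', ['0', '1', '0', '1', '1', '0']), ('X', ['0', '1', '0', '1', '1', '1']), ('Y', ['0', '1', '1', '0', '0', '0']), ('Z', ['0', '1', '1', '0', '0', '1']), ('a', ['0', '1', '1', '0', '1', '0']), ('b', ['0', '1', '1', '0', '1', '1']), ('c', ['0', '1', '1', '1', '0', '0']), ('d', ['0', '1', '1', '1', '0', '1']), ('e', ['0', '1', '1', '1', '1', '0']), ('f', ['0', '1', '1', '1', '1', '1']), ('g', ['1', '0', '0', '0', '0', '0']), ('h', ['1', '0', '0', '0', '0', '1']), ('i', ['1', '0', '0', '0', '1', '0']), ('j', ['1', '0', '0', '0', '1', '1']), ('k', ['1', '0', '0', '1', '0', '0']), ('l', ['1', '0', '0', '1', '0', '1']), ('m', ['1', '0', '0', '1', '1', '0']),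 ('n', ['1', '0', '0', '1', '1', '1']), ('o', ['1', '0', '1', '0', '0', '0']), ('p', ['1', '0', '1', '0', '0', '1']), ('q', ['1', '0', '1', '0', '1', '0']), ('r', ['1', '0', '1', '0', '1', '1']), ('s', ['1', '0', '1', '1', '0', '0']), ('t', ['1', '0', '1', '1', '0', '1']), ('u', ['1', '0', '1', '1', '1', '0']), ('v', ['1', '0', '1', '1', '1', '1']), ('w', ['1', '1', '0', '0', '0', '0']), ('x', ['1', '1', '0', '0', '0', '1']), ('y', ['1', '1', '0', '0', '1', '0']), ('z', ['1', '1', '0', '0', '1', '1']), ('0', ['1', '1', '0', '1', '0', '0']), ('1', ['1', '1', '0', '1', '0', '1']), ('2', ['1', '1', '0', '1', '1', '0']), ('3', ['1', '1', '0', '1', '1', '1']), ('4', ['1', '1', '1', '0', '0', '0']), ('5', ['1', '1', '1', '0', '0', '1']), ('6', ['1', '1', '1', '0', '1', '0']), ('7', ['1', '1', '1', '0', '1', '1']), ('8', ['1', '1', '1', '1', '0', '0']), ('9', ['1', '1', '1', '1', '0', '1']), ('+', ['1', '1', '1', '1', '1', '0']), ('/', ['1', '1', '1', '1', '1', '1'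])]

def pvValL : PySem.Dict Char Int := PySem.Dict.mk [('A', 0), ('B', 1), ('C', 2), ('D', 3), ('E', 4), ('F', 5), ('G', 6), ('H', 7), ('I', 8), ('J', 9), ('K', 10), ('L', 11), ('M', 12), ('N', 13), ('O', 14), ('P', 15), ('Q', 16), ('R', 17), ('S', 18), ('T', 19), ('U', 20), ('V', 21), ('W', 22), ('X', 23), ('Y', 24), ('Z', 25), ('a', 26), ('b', 27), ('c', 28), ('d', 29), ('e', 30), ('f', 31), ('g', 32), ('h', 33), ('i', 34), ('j', 35), ('k', 36), ('l', 37), ('m', 38), ('n', 39), ('o', 40), ('p', 41), ('q', 42), ('r', 43), ('s', 44), ('t', 45), ('u', 46), ('v', 47), ('w', 48), ('x', 49), ('y', 50), ('z', 51), ('0', 52), ('1', 53), ('2', 54), ('3', 55), ('4', 56), ('5', 57), ('6', 58), ('7', 59), ('8', 60), ('9', 61), ('+', 62), ('/', 63), ('=', 0)]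

def pvLBits (c : Char) : List Char := if c ≠ '=' then pvDictL.getD c [] else ['0', '0', '0', '0', '0', '0']

set_option maxRecDepth 20000 in
lemma pvDictA_eq : pvDictA = pvDictL := by decide

set_option maxRecDepth 20000 in
lemma pvValB_eq : pvValB = pvValL := by decide

lemma pvBitsOf_eq' : pvBitsOf = pvLBits := by
  funext c; simp only [pvBitsOf, pvLBits, pvDictL, pvDictA_eq]

set_option maxRecDepth 4000 in
lemma pvQ0 : (pvLBits 'A').length = 6 ∧ ((pvLBits 'A').all (fun b => b == '0' || b == '1')) = true ∧ pvBitsVal (pvLBits 'A') = pvValL.getD 'A' 0 ∧ 0 ≤ pvValL.getD 'A' 0 ∧ pvValL.getD 'A' 0 < 64 := by decide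
set_option maxRecDepth 4000 in
lemma pvQ1 : (pvLBits 'B').length = 6 ∧ ((pvLBits 'B').all (fun b => b == '0' || b == '1')) = true ∧ pvBitsVal (pvLBits 'B') = pvValL.getD 'B' 0 ∧ 0 ≤ pvValL.getD 'B' 0 ∧ pvValL.getD 'B' 0 < 64 := by decide
set_option maxRecDepth 4000 in
lemma pvQ2 : (pvLBits 'C').length = 6 ∧ ((pvLBits 'C').all (fun b => b == '0' || b == '1')) = true ∧ pvBitsVal (pvLBits 'C') = pvValL.getD 'C' 0 ∧ 0 ≤ pvValL.getD 'C' 0 ∧ pvValL.getD 'C' 0 < 64 := by decide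
set_option maxRecDepth 4000 in
lemma pvQ3 : (pvLBits 'D').length = 6 ∧ ((pvLBits 'D').all (fun b => b == '0' || b == '1')) = true ∧ pvBitsVal (pvLBits 'D') = pvValL.getD 'D' 0 ∧ 0 ≤ pvValL.getD 'D' 0 ∧ pvValL.getD 'D' 0 < 64 := by decide
set_option maxRecDepth 4000 in
lemma pvQ4 : (pvLBits 'E').length = 6 ∧ ((pvLBits 'E').all (fun b => b == '0' || b == '1')) = true ∧ pvBitsVal (pvLBits 'E') = pvValL.getD 'E' 0 ∧ 0 ≤ pvValL.getD 'E' 0 ∧ pvValL.getD 'E' 0 < 64 := by decide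
set_option maxRecDepth 4000 in
lemma pvQ5 : (pvLBits 'F').length = 6 ∧ ((pvLBits 'F').all (fun b => b == '0' || b == '1')) = true ∧ pvBitsVal (pvLBits 'F') = pvValL.getD 'F' 0 ∧ 0 ≤ pvValL.getD 'F' 0 ∧ pvValL.getD 'F' 0 < 64 := by decide
set_option maxRecDepth 4000 in
lemma pvQ6 : (pvLBits 'G').length = 6 ∧ ((pvLBits 'G').all (fun b => b == '0' || b == '1')) = true ∧ pvBitsVal (pvLBits 'G') = pvValL.getD 'G' 0 ∧ 0 ≤ pvValL.getD 'G' 0 ∧ pvValL.getD 'G' 0 < 64 := by decide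
set_option maxRecDepth 4000 in
lemma pvQ7 : (pvLBits 'H').length = 6 ∧ ((pvLBits 'H').all (fun b => b == '0' || b == '1')) = true ∧ pvBitsVal (pvLBits 'H') = pvValL.getD 'H' 0 ∧ 0 ≤ pvValL.getD 'H' 0 ∧ pvValL.getD 'H' 0 < 64 := by decide
set_option maxRecDepth 4000 in
lemma pvQ8 : (pvLBits 'I').length = 6 ∧ ((pvLBits 'I').all (fun b => b == '0' || b == '1')) = true ∧ pvBitsVal (pvLBits 'I') = pvValL.getD 'I' 0 ∧ 0 ≤ pvValL.getD 'I' 0 ∧ pvValL.getD 'I' 0 < 64 := by decide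
set_option maxRecDepth 4000 in
lemma pvQ9 : (pvLBits 'J').length = 6 ∧ ((pvLBits 'J').all (fun b => b == '0' || b == '1')) = true ∧ pvBitsVal (pvLBits 'J') = pvValL.getD 'J' 0 ∧ 0 ≤ pvValL.getD 'J' 0 ∧ pvValL.getD 'J' 0 < 64 := by decide
set_option maxRecDepth 4000 in
lemma pvQ10 : (pvLBits 'K').length = 6 ∧ ((pvLBits 'K').all (fun b => b == '0' || b == '1')) = true ∧ pvBitsVal (pvLBits 'K') = pvValL.getD 'K' 0 ∧ 0 ≤ pvValL.getD 'K' 0 ∧ pvValL.getD 'K' 0 < 64 := by decide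
set_option maxRecDepth 4000 in
lemma pvQ11 : (pvLBits 'L').length = 6 ∧ ((pvLBits 'L').all (fun b => b == '0' || b == '1')) = true ∧ pvBitsVal (pvLBits 'L') = pvValL.getD 'L' 0 ∧ 0 ≤ pvValL.getD 'L' 0 ∧ pvValL.getD 'L' 0 < 64 := by decide
set_option maxRecDepth 4000 in
lemma pvQ12 : (pvLBits 'M').length = 6 ∧ ((pvLBits 'M').all (fun b => b == '0' || b == '1')) = true ∧ pvBitsVal (pvLBits 'M') = pvValL.getD 'M' 0 ∧ 0 ≤ pvValL.getD 'M' 0 ∧ pvValL.getD 'M' 0 < 64 := by decide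
set_option maxRecDepth 4000 in
lemma pvQ13 : (pvLBits 'N').length = 6 ∧ ((pvLBits 'N').all (fun b => b == '0' || b == '1')) = true ∧ pvBitsVal (pvLBits 'N') = pvValL.getD 'N' 0 ∧ 0 ≤ pvValL.getD 'N' 0 ∧ pvValL.getD 'N' 0 < 64 := by decide
set_option maxRecDepth 4000 in
lemma pvQ14 : (pvLBits 'O').length = 6 ∧ ((pvLBits 'O').all (fun b => b == '0' || b == '1')) = true ∧ pvBitsVal (pvLBits 'O') = pvValL.getD 'O' 0 ∧ 0 ≤ pvValL.getD 'O' 0 ∧ pvValL.getD 'O' 0 < 64 := by decide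
set_option maxRecDepth 4000 in
lemma pvQ15 : (pvLBits 'P').length = 6 ∧ ((pvLBits 'P').all (fun b => b == '0' || b == '1')) = true ∧ pvBitsVal (pvLBits 'P') = pvValL.getD 'P' 0 ∧ 0 ≤ pvValL.getD 'P' 0 ∧ pvValL.getD 'P' 0 < 64 := by decide
set_option maxRecDepth 4000 in
lemma pvQ16 : (pvLBits 'Q').length = 6 ∧ ((pvLBits 'Q').all (fun b => b == '0' || b == '1')) = true ∧ pvBitsVal (pvLBits 'Q') = pvValL.getD 'Q' 0 ∧ 0 ≤ pvValL.getD 'Q' 0 ∧ pvValL.getD 'Q' 0 < 64 := by decide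
set_option maxRecDepth 4000 in
lemma pvQ17 : (pvLBits 'R').length = 6 ∧ ((pvLBits 'R').all (fun b => b == '0' || b == '1')) = true ∧ pvBitsVal (pvLBits 'R') = pvValL.getD 'R' 0 ∧ 0 ≤ pvValL.getD 'R' 0 ∧ pvValL.getD 'R' 0 < 64 := by decide
set_option maxRecDepth 4000 in
lemma pvQ18 : (pvLBits 'S').length = 6 ∧ ((pvLBits 'S').all (fun b => b == '0' || b == '1')) = true ∧ pvBitsVal (pvLBits 'S') = pvValL.getD 'S' 0 ∧ 0 ≤ pvValL.getD 'S' 0 ∧ pvValL.getD 'S' 0 < 64 := by decide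
set_option maxRecDepth 4000 in
lemma pvQ19 : (pvLBits 'T').length = 6 ∧ ((pvLBits 'T').all (fun b => b == '0' || b == '1')) = true ∧ pvBitsVal (pvLBits 'T') = pvValL.getD 'T' 0 ∧ 0 ≤ pvValL.getD 'T' 0 ∧ pvValL.getD 'T' 0 < 64 := by decide
set_option maxRecDepth 4000 in
lemma pvQ20 : (pvLBits 'U').length = 6 ∧ ((pvLBits 'U').all (fun b => b == '0' || b == '1')) = true ∧ pvBitsVal (pvLBits 'U') = pvValL.getD 'U' 0 ∧ 0 ≤ pvValL.getD 'U' 0 ∧ pvValL.getD 'U' 0 < 64 := by decide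
set_option maxRecDepth 4000 in
lemma pvQ21 : (pvLBits 'V').length = 6 ∧ ((pvLBits 'V').all (fun b => b == '0' || b == '1')) = true ∧ pvBitsVal (pvLBits 'V') = pvValL.getD 'V' 0 ∧ 0 ≤ pvValL.getD 'V' 0 ∧ pvValL.getD 'V' 0 < 64 := by decide
set_option maxRecDepth 4000 in
lemma pvQ22 : (pvLBits 'W').length = 6 ∧ ((pvLBits 'W').all (fun b => b == '0' || b == '1')) = true ∧ pvBitsVal (pvLBits 'W') = pvValL.getD 'W' 0 ∧ 0 ≤ pvValL.getD 'W' 0 ∧ pvValL.getD 'W' 0 < 64 := by decide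
set_option maxRecDepth 4000 in
lemma pvQ23 : (pvLBits 'X').length = 6 ∧ ((pvLBits 'X').all (fun b => b == '0' || b == '1')) = true ∧ pvBitsVal (pvLBits 'X') = pvValL.getD 'X' 0 ∧ 0 ≤ pvValL.getD 'X' 0 ∧ pvValL.getD 'X' 0 < 64 := by decide
set_option maxRecDepth 4000 in
lemma pvQ24 : (pvLBits 'Y').length = 6 ∧ ((pvLBits 'Y').all (fun b => b == '0' || b == '1')) = true ∧ pvBitsVal (pvLBits 'Y') = pvValL.getD 'Y' 0 ∧ 0 ≤ pvValL.getD 'Y' 0 ∧ pvValL.getD 'Y' 0 < 64 := by decide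
set_option maxRecDepth 4000 in
lemma pvQ25 : (pvLBits 'Z').length = 6 ∧ ((pvLBits 'Z').all (fun b => b == '0' || b == '1')) = true ∧ pvBitsVal (pvLBits 'Z') = pvValL.getD 'Z' 0 ∧ 0 ≤ pvValL.getD 'Z' 0 ∧ pvValL.getD 'Z' 0 < 64 := by decide
set_option maxRecDepth 4000 in
lemma pvQ26 : (pvLBits 'a').length = 6 ∧ ((pvLBits 'a').all (fun b => b == '0' || b == '1')) = true ∧ pvBitsVal (pvLBits 'a') = pvValL.getD 'a' 0 ∧ 0 ≤ pvValL.getD 'a' 0 ∧ pvValL.getD 'a' 0 < 64 := by decide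
set_option maxRecDepth 4000 in
lemma pvQ27 : (pvLBits 'b').length = 6 ∧ ((pvLBits 'b').all (fun b => b == '0' || b == '1')) = true ∧ pvBitsVal (pvLBits 'b') = pvValL.getD 'b' 0 ∧ 0 ≤ pvValL.getD 'b' 0 ∧ pvValL.getD 'b' 0 < 64 := by decide
set_option maxRecDepth 4000 in
lemma pvQ28 : (pvLBits 'c').length = 6 ∧ ((pvLBits 'c').all (fun b => b == '0' || b == '1')) = true ∧ pvBitsVal (pvLBits 'c') = pvValL.getD 'c' 0 ∧ 0 ≤ pvValL.getD 'c' 0 ∧ pvValL.getD 'c' 0 < 64 := by decide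
set_option maxRecDepth 4000 in
lemma pvQ29 : (pvLBits 'd').length = 6 ∧ ((pvLBits 'd').all (fun b => b == '0' || b == '1')) = true ∧ pvBitsVal (pvLBits 'd') = pvValL.getD 'd' 0 ∧ 0 ≤ pvValL.getD 'd' 0 ∧ pvValL.getD 'd' 0 < 64 := by decide
set_option maxRecDepth 4000 in
lemma pvQ30 : (pvLBits 'e').length = 6 ∧ ((pvLBits 'e').all (fun b => b == '0' || b == '1')) = true ∧ pvBitsVal (pvLBits 'e') = pvValL.getD 'e' 0 ∧ 0 ≤ pvValL.getD 'e' 0 ∧ pvValL.getD 'e' 0 < 64 := by decide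
set_option maxRecDepth 4000 in
lemma pvQ31 : (pvLBits 'f').length = 6 ∧ ((pvLBits 'f').all (fun b => b == '0' || b == '1')) = true ∧ pvBitsVal (pvLBits 'f') = pvValL.getD 'f' 0 ∧ 0 ≤ pvValL.getD 'f' 0 ∧ pvValL.getD 'f' 0 < 64 := by decide
set_option maxRecDepth 4000 in
lemma pvQ32 : (pvLBits 'g').length = 6 ∧ ((pvLBits 'g').all (fun b => b == '0' || b == '1')) = true ∧ pvBitsVal (pvLBits 'g') = pvValL.getD 'g' 0 ∧ 0 ≤ pvValL.getD 'g' 0 ∧ pvValL.getD 'g' 0 < 64 := by decide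
set_option maxRecDepth 4000 in
lemma pvQ33 : (pvLBits 'h').length = 6 ∧ ((pvLBits 'h').all (fun b => b == '0' || b == '1')) = true ∧ pvBitsVal (pvLBits 'h') = pvValL.getD 'h' 0 ∧ 0 ≤ pvValL.getD 'h' 0 ∧ pvValL.getD 'h' 0 < 64 := by decide
set_option maxRecDepth 4000 in
lemma pvQ34 : (pvLBits 'i').length = 6 ∧ ((pvLBits 'i').all (fun b => b == '0' || b == '1')) = true ∧ pvBitsVal (pvLBits 'i') = pvValL.getD 'i' 0 ∧ 0 ≤ pvValL.getD 'i' 0 ∧ pvValL.getD 'i' 0 < 64 := by decide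
set_option maxRecDepth 4000 in
lemma pvQ35 : (pvLBits 'j').length = 6 ∧ ((pvLBits 'j').all (fun b => b == '0' || b == '1')) = true ∧ pvBitsVal (pvLBits 'j') = pvValL.getD 'j' 0 ∧ 0 ≤ pvValL.getD 'j' 0 ∧ pvValL.getD 'j' 0 < 64 := by decide
set_option maxRecDepth 4000 in
lemma pvQ36 : (pvLBits 'k').length = 6 ∧ ((pvLBits 'k').all (fun b => b == '0' || b == '1')) = true ∧ pvBitsVal (pvLBits 'k') = pvValL.getD 'k' 0 ∧ 0 ≤ pvValL.getD 'k' 0 ∧ pvValL.getD 'k' 0 < 64 := by decide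
set_option maxRecDepth 4000 in
lemma pvQ37 : (pvLBits 'l').length = 6 ∧ ((pvLBits 'l').all (fun b => b == '0' || b == '1')) = true ∧ pvBitsVal (pvLBits 'l') = pvValL.getD 'l' 0 ∧ 0 ≤ pvValL.getD 'l' 0 ∧ pvValL.getD 'l' 0 < 64 := by decide
set_option maxRecDepth 4000 in
lemma pvQ38 : (pvLBits 'm').length = 6 ∧ ((pvLBits 'm').all (fun b => b == '0' || b == '1')) = true ∧ pvBitsVal (pvLBits 'm') = pvValL.getD 'm' 0 ∧ 0 ≤ pvValL.getD 'm' 0 ∧ pvValL.getD 'm' 0 < 64 := by decide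
set_option maxRecDepth 4000 in
lemma pvQ39 : (pvLBits 'n').length = 6 ∧ ((pvLBits 'n').all (fun b => b == '0' || b == '1')) = true ∧ pvBitsVal (pvLBits 'n') = pvValL.getD 'n' 0 ∧ 0 ≤ pvValL.getD 'n' 0 ∧ pvValL.getD 'n' 0 < 64 := by decide
set_option maxRecDepth 4000 in
lemma pvQ40 : (pvLBits 'o').length = 6 ∧ ((pvLBits 'o').all (fun b => b == '0' || b == '1')) = true ∧ pvBitsVal (pvLBits 'o') = pvValL.getD 'o' 0 ∧ 0 ≤ pvValL.getD 'o' 0 ∧ pvValL.getD 'o' 0 < 64 := by decide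
set_option maxRecDepth 4000 in
lemma pvQ41 : (pvLBits 'p').length = 6 ∧ ((pvLBits 'p').all (fun b => b == '0' || b == '1')) = true ∧ pvBitsVal (pvLBits 'p') = pvValL.getD 'p' 0 ∧ 0 ≤ pvValL.getD 'p' 0 ∧ pvValL.getD 'p' 0 < 64 := by decide
set_option maxRecDepth 4000 in
lemma pvQ42 : (pvLBits 'q').length = 6 ∧ ((pvLBits 'q').all (fun b => b == '0' || b == '1')) = true ∧ pvBitsVal (pvLBits 'q') = pvValL.getD 'q' 0 ∧ 0 ≤ pvValL.getD 'q' 0 ∧ pvValL.getD 'q' 0 < 64 := by decide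
set_option maxRecDepth 4000 in
lemma pvQ43 : (pvLBits 'r').length = 6 ∧ ((pvLBits 'r').all (fun b => b == '0' || b == '1')) = true ∧ pvBitsVal (pvLBits 'r') = pvValL.getD 'r' 0 ∧ 0 ≤ pvValL.getD 'r' 0 ∧ pvValL.getD 'r' 0 < 64 := by decide
set_option maxRecDepth 4000 in
lemma pvQ44 : (pvLBits 's').length = 6 ∧ ((pvLBits 's').all (fun b => b == '0' || b == '1')) = true ∧ pvBitsVal (pvLBits 's') = pvValL.getD 's' 0 ∧ 0 ≤ pvValL.getD 's' 0 ∧ pvValL.getD 's' 0 < 64 := by decide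
set_option maxRecDepth 4000 in
lemma pvQ45 : (pvLBits 't').length = 6 ∧ ((pvLBits 't').all (fun b => b == '0' || b == '1')) = true ∧ pvBitsVal (pvLBits 't') = pvValL.getD 't' 0 ∧ 0 ≤ pvValL.getD 't' 0 ∧ pvValL.getD 't' 0 < 64 := by decide
set_option maxRecDepth 4000 in
lemma pvQ46 : (pvLBits 'u').length = 6 ∧ ((pvLBits 'u').all (fun b => b == '0' || b == '1')) = true ∧ pvBitsVal (pvLBits 'u') = pvValL.getD 'u' 0 ∧ 0 ≤ pvValL.getD 'u' 0 ∧ pvValL.getD 'u' 0 < 64 := by decide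
set_option maxRecDepth 4000 in
lemma pvQ47 : (pvLBits 'v').length = 6 ∧ ((pvLBits 'v').all (fun b => b == '0' || b == '1')) = true ∧ pvBitsVal (pvLBits 'v') = pvValL.getD 'v' 0 ∧ 0 ≤ pvValL.getD 'v' 0 ∧ pvValL.getD 'v' 0 < 64 := by decide
set_option maxRecDepth 4000 in
lemma pvQ48 : (pvLBits 'w').length = 6 ∧ ((pvLBits 'w').all (fun b => b == '0' || b == '1')) = true ∧ pvBitsVal (pvLBits 'w') = pvValL.getD 'w' 0 ∧ 0 ≤ pvValL.getD 'w' 0 ∧ pvValL.getD 'w' 0 < 64 := by decide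
set_option maxRecDepth 4000 in
lemma pvQ49 : (pvLBits 'x').length = 6 ∧ ((pvLBits 'x').all (fun b => b == '0' || b == '1')) = true ∧ pvBitsVal (pvLBits 'x') = pvValL.getD 'x' 0 ∧ 0 ≤ pvValL.getD 'x' 0 ∧ pvValL.getD 'x' 0 < 64 := by decide
set_option maxRecDepth 4000 in
lemma pvQ50 : (pvLBits 'y').length = 6 ∧ ((pvLBits 'y').all (fun b => b == '0' || b == '1')) = true ∧ pvBitsVal (pvLBits 'y') = pvValL.getD 'y' 0 ∧ 0 ≤ pvValL.getD 'y' 0 ∧ pvValL.getD 'y' 0 < 64 := by decide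
set_option maxRecDepth 4000 in
lemma pvQ51 : (pvLBits 'z').length = 6 ∧ ((pvLBits 'z').all (fun b => b == '0' || b == '1')) = true ∧ pvBitsVal (pvLBits 'z') = pvValL.getD 'z' 0 ∧ 0 ≤ pvValL.getD 'z' 0 ∧ pvValL.getD 'z' 0 < 64 := by decide
set_option maxRecDepth 4000 in
lemma pvQ52 : (pvLBits '0').length = 6 ∧ ((pvLBits '0').all (fun b => b == '0' || b == '1')) = true ∧ pvBitsVal (pvLBits '0') = pvValL.getD '0' 0 ∧ 0 ≤ pvValL.getD '0' 0 ∧ pvValL.getD '0' 0 < 64 := by decide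
set_option maxRecDepth 4000 in
lemma pvQ53 : (pvLBits '1').length = 6 ∧ ((pvLBits '1').all (fun b => b == '0' || b == '1')) = true ∧ pvBitsVal (pvLBits '1') = pvValL.getD '1' 0 ∧ 0 ≤ pvValL.getD '1' 0 ∧ pvValL.getD '1' 0 < 64 := by decide
set_option maxRecDepth 4000 in
lemma pvQ54 : (pvLBits '2').length = 6 ∧ ((pvLBits '2').all (fun b => b == '0' || b == '1')) = true ∧ pvBitsVal (pvLBits '2') = pvValL.getD '2' 0 ∧ 0 ≤ pvValL.getD '2' 0 ∧ pvValL.getD '2' 0 < 64 := by decide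
set_option maxRecDepth 4000 in
lemma pvQ55 : (pvLBits '3').length = 6 ∧ ((pvLBits '3').all (fun b => b == '0' || b == '1')) = true ∧ pvBitsVal (pvLBits '3') = pvValL.getD '3' 0 ∧ 0 ≤ pvValL.getD '3' 0 ∧ pvValL.getD '3' 0 < 64 := by decide
set_option maxRecDepth 4000 in
lemma pvQ56 : (pvLBits '4').length = 6 ∧ ((pvLBits '4').all (fun b => b == '0' || b == '1')) = true ∧ pvBitsVal (pvLBits '4') = pvValL.getD '4' 0 ∧ 0 ≤ pvValL.getD '4' 0 ∧ pvValL.getD '4' 0 < 64 := by decide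
set_option maxRecDepth 4000 in
lemma pvQ57 : (pvLBits '5').length = 6 ∧ ((pvLBits '5').all (fun b => b == '0' || b == '1')) = true ∧ pvBitsVal (pvLBits '5') = pvValL.getD '5' 0 ∧ 0 ≤ pvValL.getD '5' 0 ∧ pvValL.getD '5' 0 < 64 := by decide
set_option maxRecDepth 4000 in
lemma pvQ58 : (pvLBits '6').length = 6 ∧ ((pvLBits '6').all (fun b => b == '0' || b == '1')) = true ∧ pvBitsVal (pvLBits '6') = pvValL.getD '6' 0 ∧ 0 ≤ pvValL.getD '6' 0 ∧ pvValL.getD '6' 0 < 64 := by decide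
set_option maxRecDepth 4000 in
lemma pvQ59 : (pvLBits '7').length = 6 ∧ ((pvLBits '7').all (fun b => b == '0' || b == '1')) = true ∧ pvBitsVal (pvLBits '7') = pvValL.getD '7' 0 ∧ 0 ≤ pvValL.getD '7' 0 ∧ pvValL.getD '7' 0 < 64 := by decide
set_option maxRecDepth 4000 in
lemma pvQ60 : (pvLBits '8').length = 6 ∧ ((pvLBits '8').all (fun b => b == '0' || b == '1')) = true ∧ pvBitsVal (pvLBits '8') = pvValL.getD '8' 0 ∧ 0 ≤ pvValL.getD '8' 0 ∧ pvValL.getD '8' 0 < 64 := by decide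
set_option maxRecDepth 4000 in
lemma pvQ61 : (pvLBits '9').length = 6 ∧ ((pvLBits '9').all (fun b => b == '0' || b == '1')) = true ∧ pvBitsVal (pvLBits '9') = pvValL.getD '9' 0 ∧ 0 ≤ pvValL.getD '9' 0 ∧ pvValL.getD '9' 0 < 64 := by decide
set_option maxRecDepth 4000 in
lemma pvQ62 : (pvLBits '+').length = 6 ∧ ((pvLBits '+').all (fun b => b == '0' || b == '1')) = true ∧ pvBitsVal (pvLBits '+') = pvValL.getD '+' 0 ∧ 0 ≤ pvValL.getD '+' 0 ∧ pvValL.getD '+' 0 < 64 := by decide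
set_option maxRecDepth 4000 in
lemma pvQ63 : (pvLBits '/').length = 6 ∧ ((pvLBits '/').all (fun b => b == '0' || b == '1')) = true ∧ pvBitsVal (pvLBits '/') = pvValL.getD '/' 0 ∧ 0 ≤ pvValL.getD '/' 0 ∧ pvValL.getD '/' 0 < 64 := by decide
set_option maxRecDepth 4000 in
lemma pvQ64 : (pvLBits '=').length = 6 ∧ ((pvLBits '=').all (fun b => b == '0' || b == '1')) = true ∧ pvBitsVal (pvLBits '=') = pvValL.getD '=' 0 ∧ 0 ≤ pvValL.getD '=' 0 ∧ pvValL.getD '=' 0 < 64 := by decide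

lemma pv_char_facts : ∀ c ∈ pvValidChars,
    (pvBitsOf c).length = 6 ∧ ((pvBitsOf c).all (fun b => b == '0' || b == '1')) = true ∧
    pvBitsVal (pvBitsOf c) = pvValB.getD c 0 ∧ 0 ≤ pvValB.getD c 0 ∧ pvValB.getD c 0 < 64 := by
  intro c hc
  rw [pvBitsOf_eq', pvValB_eq]
  simp only [pvValidChars, List.mem_cons, List.not_mem_nil, or_false] at hc
  rcases hc with rfl|rfl|rfl|rfl|rfl|rfl|rfl|rfl|rfl|rfl|rfl|rfl|rfl|rfl|rfl|rfl|rfl|rfl|rfl|rfl|rfl|rfl|rfl|rfl|rfl|rfl|rfl|rfl|rfl|rfl|rfl|rfl|rfl|rfl|rfl|rfl|rfl|rfl|rfl|rfl|rfl|rfl|rfl|rfl|rfl|rfl|rfl|rfl|rfl|rfl|rfl|rfl|rfl|rfl|rfl|rfl|rfl|rfl|rfl|rfl|rfl|rfl|rfl|rfl|rfl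
  exacts [pvQ0, pvQ1, pvQ2, pvQ3, pvQ4, pvQ5, pvQ6, pvQ7, pvQ8, pvQ9, pvQ10, pvQ11, pvQ12, pvQ13, pvQ14, pvQ15, pvQ16, pvQ17, pvQ18, pvQ19, pvQ20, pvQ21, pvQ22, pvQ23, pvQ24, pvQ25, pvQ26, pvQ27, pvQ28, pvQ29, pvQ30, pvQ31, pvQ32, pvQ33, pvQ34, pvQ35, pvQ36, pvQ37, pvQ38, pvQ39, pvQ40, pvQ41, pvQ42, pvQ43, pvQ44, pvQ45, pvQ46, pvQ47, pvQ48, pvQ49, pvQ50, pvQ51, pvQ52, pvQ53, pvQ54, pvQ55, pvQ56, pvQ57, pvQ58, pvQ59, pvQ60, pvQ61, pvQ62, pvQ63, pvQ64]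

lemma pvBitsVal_shift (l : List Char) (a : Int) :
    l.foldl (fun a c => 2 * a + (if c = '1' then 1 else 0)) a = a * 2 ^ l.length + pvBitsVal l := by
  induction l generalizing a with
  | nil => simp [pvBitsVal]
  | cons c t ih =>
    simp only [List.foldl_cons, List.length_cons, pvBitsVal] at *
    rw [ih, ih (2 * 0 + _)]
    ring

lemma pvBitsVal_append (l1 l2 : List Char) :
    pvBitsVal (l1 ++ l2) = pvBitsVal l1 * 2 ^ l2.length + pvBitsVal l2 := by
  unfold pvBitsVal
  rw [List.foldl_append, pvBitsVal_shift]
  rfl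

lemma pvBitsVal_nonneg (l : List Char) : 0 ≤ pvBitsVal l := by
  induction l with
  | nil => simp [pvBitsVal]
  | cons c t ih =>
    have h := pvBitsVal_shift t (2 * 0 + (if c = '1' then 1 else 0))
    simp only [pvBitsVal, List.foldl_cons] at *
    rw [h]
    have : (0:Int) ≤ (if c = '1' then (1:Int) else 0) := by split <;> norm_num
    positivity

lemma pvBitsVal_lt (l : List Char) : pvBitsVal l < 2 ^ l.length := by
  induction l with
  | nil => simp [pvBitsVal]
  | cons c t ih =>
    have h := pvBitsVal_shift t (2 * 0 + (if c = '1' then 1 else 0))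
    simp only [pvBitsVal, List.foldl_cons, List.length_cons] at *
    rw [h]
    have hb : (if c = '1' then (1:Int) else 0) ≤ 1 := by split <;> norm_num
    have : (2:Int) ^ (t.length + 1) = 2 ^ t.length + 2 ^ t.length := by ring
    rw [this]
    have hb0 : (0:Int) ≤ (if c = '1' then (1:Int) else 0) := by split <;> norm_num
    have hp : (0:Int) < 2 ^ t.length := by positivity
    nlinarith [ih, hb, hb0, hp]

lemma pv_ofBase2_8 : ∀ b0 b1 b2 b3 b4 b5 b6 b7 : Bool,
    PySem.Int.ofCharsBase? [pvCh b0, pvCh b1, pvCh b2, pvCh b3, pvCh b4, pvCh b5, pvCh b6, pvCh b7] 2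
      = some (pvBitsVal [pvCh b0, pvCh b1, pvCh b2, pvCh b3, pvCh b4, pvCh b5, pvCh b6, pvCh b7]) := by
  decide

lemma pv_len8 {l : List Char} (h : l.length = 8) :
    ∃ a b c d e f g h', l = [a, b, c, d, e, f, g, h'] := by
  match l, h with
  | [a, b, c, d, e, f, g, h'], _ => exact ⟨a, b, c, d, e, f, g, h', rfl⟩

lemma pv_len4 {l : List Char} (h : l.length = 4) : ∃ a b c d, l = [a, b, c, d] := by
  match l, h with
  | [a, b, c, d], _ => exact ⟨a, b, c, d, rfl⟩

lemma pv_chbit {c : Char} (h : c = '0' ∨ c = '1') : c = pvCh (c == '1') := by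
  rcases h with rfl | rfl <;> rfl

lemma pv_ofBase2_of_bits (l : List Char) (h8 : l.length = 8)
    (hb : ∀ c ∈ l, c = '0' ∨ c = '1') :
    PySem.Int.ofCharsBase? l 2 = some (pvBitsVal l) := by
  obtain ⟨a, b, c, d, e, f, g, h', rfl⟩ := pv_len8 h8
  simp only [List.mem_cons, List.not_mem_nil, or_false, forall_eq_or_imp, forall_eq] at hb
  obtain ⟨h1, h2, h3, h4, h5, h6, h7, h8'⟩ := hb
  rw [pv_chbit h1, pv_chbit h2, pv_chbit h3, pv_chbit h4, pv_chbit h5, pv_chbit h6,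
      pv_chbit h7, pv_chbit h8']
  exact pv_ofBase2_8 _ _ _ _ _ _ _ _

lemma pv_digit_eq : ∀ d : Nat, d < 16 → pvHexDigitA d = pvHexDigitB d := by decide

lemma pv_hexAB (n : Int) (h0 : 0 ≤ n) (h1 : n < 256) : pvHexA n = pvHexB n := by
  unfold pvHexA pvHexB
  by_cases h : n < 16
  · have e1 : n.toNat / 16 = 0 := by omega
    have e2 : n.toNat % 16 = n.toNat := by omega
    simp only [h, if_true, List.length_cons, List.length_nil, e1, e2]
    rw [pv_digit_eq n.toNat (by omega), show '0' = pvHexDigitB 0 from by decide]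
  · simp only [h, if_false]
    rw [pv_digit_eq (n.toNat / 16) (by omega), pv_digit_eq (n.toNat % 16) (by omega)]
    rfl

lemma pv_a_bin (c0 c1 c2 c3 : Char) :
    pvA_base64_to_bin [c0, c1, c2, c3] = some (pvBitsOf c0 ++ pvBitsOf c1 ++ pvBitsOf c2 ++ pvBitsOf c3) := by
  have hr : List.range 4 = [0, 1, 2, 3] := rfl
  simp only [pvA_base64_to_bin, hr, List.foldl_cons, List.foldl_nil, pvBitsOf]
  have h0 : ([c0, c1, c2, c3].getD 0 ' ') = c0 := rfl
  have h1 : ([c0, c1, c2, c3].getD 1 ' ') = c1 := rfl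
  have h2 : ([c0, c1, c2, c3].getD 2 ' ') = c2 := rfl
  have h3 : ([c0, c1, c2, c3].getD 3 ' ') = c3 := rfl
  rw [h0, h1, h2, h3]
  have hlen : ¬(([c0, c1, c2, c3] : List Char).length ≠ 4) := by simp
  rw [if_neg hlen]
  split_ifs <;> simp [List.append_assoc]

set_option maxHeartbeats 2000000 in
lemma pv_block (c0 c1 c2 c3 : Char)
    (h0 : c0 ∈ pvValidChars) (h1 : c1 ∈ pvValidChars)
    (h2 : c2 ∈ pvValidChars) (h3 : c3 ∈ pvValidChars)
    (z : Int) (t : Nat) (hz : (3 - z).toNat = t) (ht : t ≤ 3) :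
    ((pvA_base64_to_bin [c0, c1, c2, c3]).bind (fun b => pvA_bin_to_hex b z)).getD []
      = (List.range t).foldl (fun out k =>
          out ++ pvHexB (PySem.Int.mod (PySem.Int.floordiv (pvBlockVal c0 c1 c2 c3) ((256 : Int) ^ (2 - k))) 256)) [] := by
  obtain ⟨L0, A0, E0, N0, U0⟩ := pv_char_facts c0 h0
  obtain ⟨L1, A1, E1, N1, U1⟩ := pv_char_facts c1 h1
  obtain ⟨L2, A2, E2, N2, U2⟩ := pv_char_facts c2 h2
  obtain ⟨L3, A3, E3, N3, U3⟩ := pv_char_facts c3 h3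
  have P0 : ∀ b ∈ pvBitsOf c0, b = '0' ∨ b = '1' := by
    intro b hb; have := List.all_eq_true.mp A0 b hb; simpa using this
  have P1 : ∀ b ∈ pvBitsOf c1, b = '0' ∨ b = '1' := by
    intro b hb; have := List.all_eq_true.mp A1 b hb; simpa using this
  have P2 : ∀ b ∈ pvBitsOf c2, b = '0' ∨ b = '1' := by
    intro b hb; have := List.all_eq_true.mp A2 b hb; simpa using this
  have P3 : ∀ b ∈ pvBitsOf c3, b = '0' ∨ b = '1' := by
    intro b hb; have := List.all_eq_true.mp A3 b hb; simpa using this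
  rw [pv_a_bin]
  simp only [Option.bind_some]
  have hlen : (pvBitsOf c0 ++ pvBitsOf c1 ++ pvBitsOf c2 ++ pvBitsOf c3).length = 24 := by
    simp [L0, L1, L2, L3]
  unfold pvA_bin_to_hex
  rw [if_neg (by rw [hlen]; omega), hz]
  simp only [Option.getD_some]
  apply PySem.List.foldl_congr_mem
  intro acc k hk
  have hk3 : k < 3 := lt_of_lt_of_le (List.mem_range.mp hk) ht
  congr 1
  -- name the pieces
  have hsplit1 := List.take_append_drop 2 (pvBitsOf c1)
  have hsplit2 := List.take_append_drop 4 (pvBitsOf c2)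
  have lt1 : (List.take 2 (pvBitsOf c1)).length = 2 := by simp [L1]
  have ld1 : (List.drop 2 (pvBitsOf c1)).length = 4 := by simp [L1]
  have lt2 : (List.take 4 (pvBitsOf c2)).length = 4 := by simp [L2]
  have ld2 : (List.drop 4 (pvBitsOf c2)).length = 2 := by simp [L2]
  have hV1 : pvBitsVal (pvBitsOf c1) = pvBitsVal (List.take 2 (pvBitsOf c1)) * 16 + pvBitsVal (List.drop 2 (pvBitsOf c1)) := by
    conv_lhs => rw [← hsplit1]
    rw [pvBitsVal_append, ld1]; norm_num
  have hV2 : pvBitsVal (pvBitsOf c2) = pvBitsVal (List.take 4 (pvBitsOf c2)) * 4 + pvBitsVal (List.drop 4 (pvBitsOf c2)) := by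
    conv_lhs => rw [← hsplit2]
    rw [pvBitsVal_append, ld2]; norm_num
  have bt1 := pvBitsVal_lt (List.take 2 (pvBitsOf c1)); rw [lt1] at bt1
  have bd1 := pvBitsVal_lt (List.drop 2 (pvBitsOf c1)); rw [ld1] at bd1
  have bt2 := pvBitsVal_lt (List.take 4 (pvBitsOf c2)); rw [lt2] at bt2
  have bd2 := pvBitsVal_lt (List.drop 4 (pvBitsOf c2)); rw [ld2] at bd2
  have nt1 := pvBitsVal_nonneg (List.take 2 (pvBitsOf c1))
  have nd1 := pvBitsVal_nonneg (List.drop 2 (pvBitsOf c1))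
  have nt2 := pvBitsVal_nonneg (List.take 4 (pvBitsOf c2))
  have nd2 := pvBitsVal_nonneg (List.drop 4 (pvBitsOf c2))
  have b0lt := pvBitsVal_lt (pvBitsOf c0); rw [L0] at b0lt
  have b0nn := pvBitsVal_nonneg (pvBitsOf c0)
  have b3lt := pvBitsVal_lt (pvBitsOf c3); rw [L3] at b3lt
  have b3nn := pvBitsVal_nonneg (pvBitsOf c3)
  unfold pvBlockVal
  rw [← E0, ← E1, ← E2, ← E3, hV1, hV2]
  interval_cases k
  · -- byte 0 : b0 ++ take 2 b1
    rw [PySem.List.slice_natCast]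
    have hs : List.take (8 * 0 + 8 - 8 * 0) (List.drop (8 * 0) (pvBitsOf c0 ++ pvBitsOf c1 ++ pvBitsOf c2 ++ pvBitsOf c3))
        = pvBitsOf c0 ++ List.take 2 (pvBitsOf c1) := by
      simp [List.take_append, L0, L1, L2, List.take_of_length_le]
    rw [hs, pv_ofBase2_of_bits _ (by simp [L0, lt1])
          (by intro b hb; rcases List.mem_append.mp hb with h | h
              exacts [P0 b h, P1 b (List.mem_of_mem_take h)])]
    simp only [Option.getD_some]
    rw [pvBitsVal_append, lt1]
    have hpos : (0:Int) < (256:Int) ^ (2 - 0) := by norm_num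
    rw [PySem.Int.floordiv_eq_ediv_of_pos hpos, PySem.Int.mod_eq_emod_of_pos (by norm_num)]
    have h256 : ((256:Int) ^ (2 - 0)) = 65536 := by norm_num
    rw [h256]
    have heq : pvBitsVal (pvBitsOf c0) * 2 ^ 2 + pvBitsVal (List.take 2 (pvBitsOf c1))
        = ((((pvBitsVal (pvBitsOf c0) * 64 + (pvBitsVal (List.take 2 (pvBitsOf c1)) * 16 + pvBitsVal (List.drop 2 (pvBitsOf c1)))) * 64 + (pvBitsVal (List.take 4 (pvBitsOf c2)) * 4 + pvBitsVal (List.drop 4 (pvBitsOf c2)))) * 64 + pvBitsVal (pvBitsOf c3)) / 65536) % 256 := by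
      omega
    rw [heq]
    exact pv_hexAB _ (by omega) (by omega)
  · -- byte 1 : drop 2 b1 ++ take 4 b2
    rw [PySem.List.slice_natCast]
    have hs : List.take (8 * 1 + 8 - 8 * 1) (List.drop (8 * 1) (pvBitsOf c0 ++ pvBitsOf c1 ++ pvBitsOf c2 ++ pvBitsOf c3))
        = List.drop 2 (pvBitsOf c1) ++ List.take 4 (pvBitsOf c2) := by
      simp [List.drop_append, List.take_append, L0, L1, L2, ld1, List.take_of_length_le]
    rw [hs, pv_ofBase2_of_bits _ (by simp [ld1, lt2])
          (by intro b hb; rcases List.mem_append.mp hb with h | h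
              exacts [P1 b (List.mem_of_mem_drop h), P2 b (List.mem_of_mem_take h)])]
    simp only [Option.getD_some]
    rw [pvBitsVal_append, lt2]
    rw [PySem.Int.floordiv_eq_ediv_of_pos (by norm_num), PySem.Int.mod_eq_emod_of_pos (by norm_num)]
    have h256 : ((256:Int) ^ (2 - 1)) = 256 := by norm_num
    rw [h256]
    have heq : pvBitsVal (List.drop 2 (pvBitsOf c1)) * 2 ^ 4 + pvBitsVal (List.take 4 (pvBitsOf c2))
        = ((((pvBitsVal (pvBitsOf c0) * 64 + (pvBitsVal (List.take 2 (pvBitsOf c1)) * 16 + pvBitsVal (List.drop 2 (pvBitsOf c1)))) * 64 + (pvBitsVal (List.take 4 (pvBitsOf c2)) * 4 + pvBitsVal (List.drop 4 (pvBitsOf c2)))) * 64 + pvBitsVal (pvBitsOf c3)) / 256) % 256 := by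
      omega
    rw [heq]
    exact pv_hexAB _ (by omega) (by omega)
  · -- byte 2 : drop 4 b2 ++ b3
    rw [PySem.List.slice_natCast]
    have hs : List.take (8 * 2 + 8 - 8 * 2) (List.drop (8 * 2) (pvBitsOf c0 ++ pvBitsOf c1 ++ pvBitsOf c2 ++ pvBitsOf c3))
        = List.drop 4 (pvBitsOf c2) ++ pvBitsOf c3 := by
      have e1 : List.drop 16 (pvBitsOf c0) = [] := List.drop_eq_nil_of_le (by omega)
      have e2 : List.drop 10 (pvBitsOf c1) = [] := List.drop_eq_nil_of_le (by omega)
      simp [List.drop_append, L0, L1, L2, L3, ld2, List.take_of_length_le, e1, e2]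
    rw [hs, pv_ofBase2_of_bits _ (by simp [ld2, L3])
          (by intro b hb; rcases List.mem_append.mp hb with h | h
              exacts [P2 b (List.mem_of_mem_drop h), P3 b h])]
    simp only [Option.getD_some]
    rw [pvBitsVal_append, L3]
    rw [PySem.Int.floordiv_eq_ediv_of_pos (by norm_num), PySem.Int.mod_eq_emod_of_pos (by norm_num)]
    have h256 : ((256:Int) ^ (2 - 2)) = 1 := by norm_num
    rw [h256]
    have heq : pvBitsVal (List.drop 4 (pvBitsOf c2)) * 2 ^ 6 + pvBitsVal (pvBitsOf c3)
        = ((((pvBitsVal (pvBitsOf c0) * 64 + (pvBitsVal (List.take 2 (pvBitsOf c1)) * 16 + pvBitsVal (List.drop 2 (pvBitsOf c1)))) * 64 + (pvBitsVal (List.take 4 (pvBitsOf c2)) * 4 + pvBitsVal (List.drop 4 (pvBitsOf c2)))) * 64 + pvBitsVal (pvBitsOf c3)) / 1) % 256 := by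
      omega
    rw [heq]
    exact pv_hexAB _ (by omega) (by omega)

-- B's per-block contribution, as a flat list (proof-side restatement of B's inner loop)
def pvF (cs : List Char) (n i : Int) : List Char :=
  let v := (PySem.List.slice cs (some i) (some (i + 4))).foldl
             (fun v c => v * 64 + pvValB.getD c 0) 0
  let nbytes : Nat :=
    if i + 4 = n ∧ PySem.List.pyGet? cs (i + 3) = some '=' then
      (if PySem.List.pyGet? cs (i + 2) = some '=' then 1 else 2)
    else 3
  (List.range nbytes).flatMap (fun k =>
    pvHexB (PySem.Int.mod (PySem.Int.floordiv v ((256 : Int) ^ (2 - k))) 256))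

lemma pv_foldl_blocks (cs : List Char) (n : Int) (l : List Int) (init : List Char) :
    l.foldl (fun out i =>
      let v := (PySem.List.slice cs (some i) (some (i + 4))).foldl
                 (fun v c => v * 64 + pvValB.getD c 0) 0
      let nbytes : Nat :=
        if i + 4 = n ∧ PySem.List.pyGet? cs (i + 3) = some '=' then
          (if PySem.List.pyGet? cs (i + 2) = some '=' then 1 else 2)
        else 3
      (List.range nbytes).foldl (fun out k =>
        out ++ pvHexB (PySem.Int.mod (PySem.Int.floordiv v ((256 : Int) ^ (2 - k))) 256)) out) init
    = init ++ l.flatMap (fun i => pvF cs n i) := by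
  induction l generalizing init with
  | nil => simp
  | cons i rest ih =>
    simp only [List.foldl_cons, List.flatMap_cons, ih]
    rw [PySem.List.foldl_append_eq_flatMap]
    simp [pvF, List.append_assoc]

lemma pv_block_fold_eq_F (cs : List Char) (n i : Int) (c0 c1 c2 c3 : Char)
    (hsl : PySem.List.slice cs (some i) (some (i + 4)) = [c0, c1, c2, c3])
    (h0 : c0 ∈ pvValidChars) (h1 : c1 ∈ pvValidChars)
    (h2 : c2 ∈ pvValidChars) (h3 : c3 ∈ pvValidChars)
    (t : Nat) (ht : t ≤ 3)
    (hnb : (if i + 4 = n ∧ PySem.List.pyGet? cs (i + 3) = some '=' then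
        (if PySem.List.pyGet? cs (i + 2) = some '=' then (1:Nat) else 2) else 3) = t)
    (z : Int) (hz : (3 - z).toNat = t) :
    ((pvA_base64_to_bin [c0, c1, c2, c3]).bind (fun b => pvA_bin_to_hex b z)).getD []
      = pvF cs n i := by
  unfold pvF
  rw [hsl]
  simp only [hnb]
  have hv : List.foldl (fun v c => v * 64 + pvValB.getD c 0) 0 [c0, c1, c2, c3]
      = pvBlockVal c0 c1 c2 c3 := by
    simp [pvBlockVal, List.foldl]
  rw [hv, pv_block c0 c1 c2 c3 h0 h1 h2 h3 z t hz ht,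
      PySem.List.foldl_append_eq_flatMap
        (fun k => pvHexB (PySem.Int.mod (PySem.Int.floordiv (pvBlockVal c0 c1 c2 c3) ((256 : Int) ^ (2 - k))) 256))]
  simp

lemma pv_slice_block (cs : List Char) (j : Nat) (hj : 4 * j + 4 ≤ cs.length) :
    ∃ c0 c1 c2 c3, List.take 4 (List.drop (4 * j) cs) = [c0, c1, c2, c3] ∧
      c0 ∈ cs ∧ c1 ∈ cs ∧ c2 ∈ cs ∧ c3 ∈ cs := by
  have hlen : (List.take 4 (List.drop (4 * j) cs)).length = 4 := by
    simp [List.length_take, List.length_drop]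
    omega
  obtain ⟨c0, c1, c2, c3, he⟩ := pv_len4 hlen
  refine ⟨c0, c1, c2, c3, he, ?_, ?_, ?_, ?_⟩ <;>
  · apply List.mem_of_mem_drop
    apply List.mem_of_mem_take
    rw [he]
    simp

-- ===== VERDICT (by name: the statement is the Claim_ definition above) =====
theorem base64_to_hex_spec : Claim_equal_base64_to_hex := by
  intro s _ hp
  obtain ⟨hne, hval⟩ := hp
  unfold Spec_base64_to_hex base64_to_hex base64_to_hex_alt
  simp only []
  by_cases h4 : s.toList.length % 4 = 0
  case neg =>
    have hne' : s.toList.length ≠ 0 := by simpa using hne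
    have hB : PySem.Int.mod ((s.toList.length : Int)) 4 ≠ 0 := by
      rw [PySem.Int.mod_eq_emod_of_pos (by norm_num)]
      omega
    rw [if_pos ⟨h4, hne'⟩, if_pos hB]
  case pos =>
    have hval' : ∀ c ∈ s.toList, c ∈ pvValidChars := by
      intro c hcm
      have := List.all_eq_true.mp (hval h4) c hcm
      simpa using this
    have hne' : s.toList.length ≠ 0 := by simpa using hne
    set cs := s.toList with hcs
    set m := cs.length / 4 with hm
    have hm4 : cs.length = 4 * m := by omega
    have hm1 : 1 ≤ m := by omega
    have hB : ¬ PySem.Int.mod ((cs.length : Int)) 4 ≠ 0 := by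
      rw [PySem.Int.mod_eq_emod_of_pos (by norm_num)]
      omega
    rw [if_neg (by tauto), if_neg hB]
    -- B side becomes a flatMap over the m blocks
    have hrange : PySem.List.pyRange 0 (cs.length : Int) 4
        = (List.range m).map (fun x => ((4 * x : Nat) : Int)) := by
      rw [PySem.List.pyRange_of_pos _ _ (by norm_num)]
      have h1 : (0:Int) < (cs.length : Int) - 0 := by omega
      rw [if_pos (by omega)]
      have h3' : ((cs.length : Int) - 0 + 4 - 1) = 3 + (m : Int) * 4 := by omega
      rw [h3', Int.add_mul_ediv_right _ _ (by norm_num : (4:Int) ≠ 0)]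
      norm_num
    rw [hrange, pv_foldl_blocks cs (cs.length : Int), List.flatMap_map]
    -- A side: the leading m-1 blocks become a flatMap
    rw [PySem.List.foldl_append_eq_flatMap
      (fun x => ((pvA_base64_to_bin (PySem.List.slice cs (some ((4 * x : Nat) : Int)) (some ((4 * x + 4 : Nat) : Int)))).bind
            (fun b => pvA_bin_to_hex b 0)).getD [])]
    simp only [List.nil_append]
    -- split off B's last block
    have hmsucc : List.range m = List.range (m - 1) ++ [m - 1] := by
      conv_lhs => rw [show m = (m - 1) + 1 by omega]
      exact List.range_succ
    rw [hmsucc, List.flatMap_append, List.flatMap_singleton]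
    -- the m-1 leading blocks agree
    have hpre : (List.range (m - 1)).flatMap
        (fun x => ((pvA_base64_to_bin (PySem.List.slice cs (some ((4 * x : Nat) : Int)) (some ((4 * x + 4 : Nat) : Int)))).bind
            (fun b => pvA_bin_to_hex b 0)).getD [])
        = (List.range (m - 1)).flatMap (fun x => pvF cs (cs.length : Int) ((4 * x : Nat) : Int)) := by
      apply List.flatMap_congr
      intro x hx
      have hxlt : x < m - 1 := List.mem_range.mp hx
      have hble : 4 * x + 4 ≤ cs.length := by omega
      obtain ⟨c0, c1, c2, c3, he, m0, m1, m2, m3⟩ := pv_slice_block cs x hble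
      have hsl : PySem.List.slice cs (some ((4 * x : Nat) : Int)) (some (((4 * x : Nat) : Int) + 4))
          = [c0, c1, c2, c3] := by
        have hc : (((4 * x : Nat) : Int) + 4) = ((4 * x + 4 : Nat) : Int) := by push_cast; ring
        rw [hc, PySem.List.slice_natCast, show (4 * x + 4 - 4 * x) = 4 by omega, he]
      have hsl' : PySem.List.slice cs (some ((4 * x : Nat) : Int)) (some ((4 * x + 4 : Nat) : Int))
          = [c0, c1, c2, c3] := by
        have hc2 : ((4 * x + 4 : Nat) : Int) = (((4 * x : Nat) : Int) + 4) := by push_cast; ring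
        rw [hc2]
        exact hsl
      rw [hsl']
      refine pv_block_fold_eq_F cs (cs.length : Int) _ c0 c1 c2 c3 hsl
        (hval' c0 m0) (hval' c1 m1) (hval' c2 m2) (hval' c3 m3) 3 le_rfl ?_ 0 rfl
      rw [if_neg]
      rintro ⟨hend, -⟩
      have : (4 * x : Int) + 4 = (cs.length : Int) := by push_cast at hend ⊢; omega
      omega
    rw [hpre]
    -- the last block: normalise A's Int indices to B's
    have hidx : ∀ (r : Int), ((m : Int) - 1) * 4 + r = ((4 * (m - 1) : Nat) : Int) + r := by
      intro r
      push_cast [Nat.cast_sub hm1]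
      ring
    have hsl0 : (((m : Int) - 1) * 4) = ((4 * (m - 1) : Nat) : Int) := by
      have := hidx 0
      omega
    have hble : 4 * (m - 1) + 4 ≤ cs.length := by omega
    obtain ⟨c0, c1, c2, c3, he, m0, m1, m2, m3⟩ := pv_slice_block cs (m - 1) hble
    have hsl : PySem.List.slice cs (some ((4 * (m - 1) : Nat) : Int)) (some (((4 * (m - 1) : Nat) : Int) + 4))
        = [c0, c1, c2, c3] := by
      have hc : (((4 * (m - 1) : Nat) : Int) + 4) = ((4 * (m - 1) + 4 : Nat) : Int) := by push_cast; ring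
      rw [hc, PySem.List.slice_natCast, show (4 * (m - 1) + 4 - 4 * (m - 1)) = 4 by omega, he]
    have hslA : PySem.List.slice cs (some (((m : Int) - 1) * 4)) (some (((m : Int) - 1) * 4 + 4))
        = [c0, c1, c2, c3] := by
      rw [← hsl]
      congr 1
      · rw [hsl0]
      · rw [hidx 4]
    have hend : ((4 * (m - 1) : Nat) : Int) + 4 = (cs.length : Int) := by
      push_cast
      omega
    rw [hidx 3, hidx 2, hslA]
    by_cases hc3 : PySem.List.pyGet? cs (((4 * (m - 1) : Nat) : Int) + 3) = some '='
    · by_cases hc2 : PySem.List.pyGet? cs (((4 * (m - 1) : Nat) : Int) + 2) = some '='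
      · rw [if_neg (by simpa using hc3), if_neg (by tauto)]
        refine congrArg some (congrArg String.ofList (congrArg _ ?_))
        refine pv_block_fold_eq_F cs (cs.length : Int) _ c0 c1 c2 c3 hsl
          (hval' c0 m0) (hval' c1 m1) (hval' c2 m2) (hval' c3 m3) 1 (by omega) ?_ 2 rfl
        rw [if_pos ⟨hend, hc3⟩, if_pos hc2]
      · rw [if_neg (by simpa using hc3), if_pos ⟨hc3, hc2⟩]
        refine congrArg some (congrArg String.ofList (congrArg _ ?_))
        refine pv_block_fold_eq_F cs (cs.length : Int) _ c0 c1 c2 c3 hsl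
          (hval' c0 m0) (hval' c1 m1) (hval' c2 m2) (hval' c3 m3) 2 (by omega) ?_ 1 rfl
        rw [if_pos ⟨hend, hc3⟩, if_neg hc2]
    · rw [if_pos hc3]
      refine congrArg some (congrArg String.ofList (congrArg _ ?_))
      refine pv_block_fold_eq_F cs (cs.length : Int) _ c0 c1 c2 c3 hsl
        (hval' c0 m0) (hval' c1 m1) (hval' c2 m2) (hval' c3 m3) 3 le_rfl ?_ 0 rfl
      rw [if_neg (by tauto)]
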